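-- pv_equiv track=rewrite | github.com/klzgrad/naiveproxy | tools/binary_size/libsupersize/apkanalyzer.py | UndoHierarchicalSizing
-- ===== SOURCE A (Python) =====
-- _TOTAL_NODE_NAME = '<TOTAL>'
--
-- def UndoHierarchicalSizing(data):
--   """Subtracts child node sizes from parent nodes.
--
--   Note that inner classes
--   should be considered as siblings rather than child nodes.
--
--   Example nodes:
--     [
--       ('<TOTAL>', 37),
--       ('org', 30),
--       ('org.chromium', 25),
--       ('org.chromium.ClassA', 14),
--       ('org.chromium.ClassA void methodA()', 10),
--       ('org.chromium.ClassA$Proxy', 8),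
--     ]
--
--   Processed nodes:
--     [
--       ('<TOTAL>', 7),
--       ('org', 5),
--       ('org.chromium', 3),
--       ('org.chromium.ClassA', 4),
--       ('org.chromium.ClassA void methodA()', 10),
--       ('org.chromium.ClassA$Proxy', 8),
--     ]
--   """
--   num_nodes = len(data)
--   nodes = []
--
--   def process_node(start_idx):
--     assert start_idx < num_nodes, 'Attempting to parse beyond data array.'
--     name, size = data[start_idx]
--     total_child_size = 0
--     next_idx = start_idx + 1
--     name_len = len(name)
--     while next_idx < num_nodes:
--       next_name = data[next_idx][0]
--       if name == _TOTAL_NODE_NAME or (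
--           next_name.startswith(name) and next_name[name_len] in '. '):
--         # Child node
--         child_next_idx, child_node_size = process_node(next_idx)
--         next_idx = child_next_idx
--         total_child_size += child_node_size
--       else:
--         # Sibling or higher nodes
--         break
--     assert total_child_size <= size, (
--         'Child node total size exceeded parent node total size')
--     node_size = size - total_child_size
--     nodes.append((name, node_size))
--     return next_idx, size
--
--   idx = 0
--   while idx < num_nodes:
--     idx = process_node(idx)[0]
--   return nodes
-- ===== SOURCE B (Python) =====
-- _TOTAL_NODE_NAME = '<TOTAL>'
--
-- def UndoHierarchicalSizing(data):
--   """Iterative single pass: explicit stack of ancestors instead of recursion."""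
--   nodes = []
--   stack = []  # entries: [name, size, total_child_size]
--
--   def pop_top():
--     name, size, total_child_size = stack.pop()
--     assert total_child_size <= size, (
--         'Child node total size exceeded parent node total size')
--     nodes.append((name, size - total_child_size))
--     if stack:
--       stack[-1][2] += size
--
--   for name, size in data:
--     while stack:
--       top_name = stack[-1][0]
--       if top_name == _TOTAL_NODE_NAME or (
--           name.startswith(top_name) and name[len(top_name)] in '. '):
--         break
--       pop_top()
--     stack.append([name, size, 0])
--   while stack:
--     pop_top()
--   return nodes
-- ===== Notes on version B (the rewrite author's own statement) =====
-- stated objective: alternative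
-- what changed: Replaces A's mutually recursive process_node (recursion per tree level with an index-returning inner while loop) by a single iterative pass that keeps an explicit stack of pending ancestor entries (name, size, child_total), popping and emitting an entry when the current name is not its descendant and draining the stack at the end.
import Mathlib
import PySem

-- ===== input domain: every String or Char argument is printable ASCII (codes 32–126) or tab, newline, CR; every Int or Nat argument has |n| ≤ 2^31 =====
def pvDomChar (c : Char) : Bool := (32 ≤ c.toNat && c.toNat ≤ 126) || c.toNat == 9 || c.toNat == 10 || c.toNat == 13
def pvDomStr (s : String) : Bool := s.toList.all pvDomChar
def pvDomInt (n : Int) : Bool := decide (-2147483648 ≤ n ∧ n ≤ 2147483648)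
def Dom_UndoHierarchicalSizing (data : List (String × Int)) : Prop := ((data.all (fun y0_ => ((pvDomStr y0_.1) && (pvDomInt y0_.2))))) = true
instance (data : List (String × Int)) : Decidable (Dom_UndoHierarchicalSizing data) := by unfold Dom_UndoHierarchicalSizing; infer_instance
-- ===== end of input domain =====

-- B replaces A's mutual recursion (process_node + its while loop) by one iterative pass
-- with an explicit stack of pending ancestors; same output (post-order), same cost.

-- shared helper: the child test 'name == "<TOTAL>" or (next.startswith(name) and next[len(name)] in ". ")'
-- (Python raises IndexError when next == name ≠ '<TOTAL>'; here pyGet? = none is read as 'no', excluded by Pre_)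
def pvIsAnc (parent child : String) : Bool :=
  parent == "<TOTAL>" ||
    (PySem.Str.startswith child parent &&
      (match PySem.Str.pyGet? child (PySem.Str.len parent) with
       | some c => c == '.' || c == ' '
       | none => false))

-- ===== PORT A =====
-- process_node with its inner while loop, recursing on the remaining suffix of data;
-- returns (nodes emitted, remaining suffix (= next_idx), total_child_size of the loop).
-- The subtype carries 'the remaining suffix is no longer than the input' (Python's next_idx only grows),
-- needed for termination; the assert (unreachable inside Pre_) is not executed.
def pnALoop (name : String) (rest : List (String × Int)) :
    {p : List (String × Int) × List (String × Int) × Int // p.2.1.length ≤ rest.length} :=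
  match rest with
  | [] => ⟨([], [], 0), by simp⟩
  | (nn, ns) :: r =>
    if pvIsAnc name nn then
      -- child node: recursive process_node(next_idx) …
      let c := pnALoop nn r
      -- … then the loop continues from the child's next_idx
      let k := pnALoop name c.1.2.1
      ⟨(c.1.1 ++ [(nn, ns - c.1.2.2)] ++ k.1.1, k.1.2.1, ns + k.1.2.2), by
        have h1 := c.2; have h2 := k.2; simp only []; exact le_trans h2 (le_trans h1 (by simp))⟩
    else
      -- sibling or higher node: break
      ⟨([], (nn, ns) :: r, 0), by simp⟩
termination_by rest.length
decreasing_by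
  · simp
  · have := c.2; simp; omega

-- the top-level 'while idx < num_nodes: idx = process_node(idx)[0]'
def pnAGo (data : List (String × Int)) : List (String × Int) :=
  match data with
  | [] => []
  | (nm, szv) :: r =>
    let c := pnALoop nm r
    c.1.1 ++ [(nm, szv - c.1.2.2)] ++ pnAGo c.1.2.1
termination_by data.length
decreasing_by have := c.2; simp; omega

def UndoHierarchicalSizing (data : List (String × Int)) : List (String × Int) :=
  pnAGo data

-- ===== PORT B =====
-- stack entries (name, size, total_child_size); head of the list = top of the stack
-- 'stack[-1][2] += size' after a pop (no-op on the empty stack)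
def pvAddTop (stack : List (String × Int × Int)) (s : Int) : List (String × Int × Int) :=
  match stack with
  | [] => []
  | (nm, sz, ch) :: t => (nm, sz, ch + s) :: t

-- 'while stack: … break / pop_top()' before pushing the current node
def pvPopWhile (cur : String) (stack : List (String × Int × Int)) (nodes : List (String × Int)) :
    List (String × Int × Int) × List (String × Int) :=
  match stack with
  | [] => ([], nodes)
  | (nm, sz, ch) :: t =>
    if pvIsAnc nm cur then ((nm, sz, ch) :: t, nodes)
    else pvPopWhile cur (pvAddTop t sz) (nodes ++ [(nm, sz - ch)])
termination_by stack.length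
decreasing_by cases t <;> simp [pvAddTop]

-- one iteration of 'for name, size in data'
def pvStep (st : List (String × Int × Int) × List (String × Int)) (x : String × Int) :
    List (String × Int × Int) × List (String × Int) :=
  ((x.1, x.2, 0) :: (pvPopWhile x.1 st.1 st.2).1, (pvPopWhile x.1 st.1 st.2).2)

-- the final 'while stack: pop_top()'
def pvDrain (stack : List (String × Int × Int)) (nodes : List (String × Int)) : List (String × Int) :=
  match stack with
  | [] => nodes
  | (nm, sz, ch) :: t => pvDrain (pvAddTop t sz) (nodes ++ [(nm, sz - ch)])
termination_by stack.length
decreasing_by cases t <;> simp [pvAddTop]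

def UndoHierarchicalSizing_alt (data : List (String × Int)) : List (String × Int) :=
  pvDrain (data.foldl pvStep ([], [])).1 (data.foldl pvStep ([], [])).2

-- ===== PRECONDITION & SPEC =====
-- name and size of node i (defaults never read inside the stated bounds)
def pvNm (data : List (String × Int)) (i : Nat) : String := (data.getD i ("", 0)).1
def pvSz (data : List (String × Int)) (i : Nat) : Int := (data.getD i ("", 0)).2

-- node i is still on the ancestor stack when node j is reached: every node strictly between is its descendant
def pvOnStack (data : List (String × Int)) (i j : Nat) : Bool :=
  (List.range j).all fun k => decide (k ≤ i) || pvIsAnc (pvNm data i) (pvNm data k)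

-- node i is the parent adopting node j: deepest stacked ancestor passing the child test
def pvIsParent (data : List (String × Int)) (i j : Nat) : Bool :=
  decide (i < j) && pvOnStack data i j && pvIsAnc (pvNm data i) (pvNm data j) &&
    ((List.range j).all fun i2 =>
      decide (i2 ≤ i) || !(pvOnStack data i2 j) || !(pvIsAnc (pvNm data i2) (pvNm data j)))

-- Pre_ excludes exactly the inputs where Python A raises: an IndexError when a node is compared
-- against a stacked node with the same name (≠ '<TOTAL>'), and an AssertionError when the sizes of
-- a node's direct children sum to more than its own size.
def Pre_UndoHierarchicalSizing (data : List (String × Int)) : Prop :=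
  (∀ j, j < data.length → ∀ i, i < j → pvOnStack data i j = true →
      pvNm data i = pvNm data j → pvNm data i = "<TOTAL>") ∧
  (∀ i, i < data.length →
      (((List.range data.length).filter (fun j => pvIsParent data i j)).map (pvSz data)).sum ≤ pvSz data i)

instance (data : List (String × Int)) : Decidable (Pre_UndoHierarchicalSizing data) := by
  unfold Pre_UndoHierarchicalSizing; infer_instance

def pvWitness_UndoHierarchicalSizing : (List (String × Int)) :=
  [("<TOTAL>", 7), ("org", 5), ("org.chromium", 2), ("org.chromium.ClassA$Proxy", 1)]

def Spec_UndoHierarchicalSizing (data : List (String × Int)) (out : List (String × Int)) : Prop := out = UndoHierarchicalSizing_alt data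
instance (data : List (String × Int)) (out : List (String × Int)) : Decidable (Spec_UndoHierarchicalSizing data out) := by unfold Spec_UndoHierarchicalSizing; infer_instance

-- ===== CLAIM (what is proved, stated in full; the proofs are below) =====
def Claim_equal_UndoHierarchicalSizing : Prop := ∀ (data : List (String × Int)), Dom_UndoHierarchicalSizing data → Pre_UndoHierarchicalSizing data → Spec_UndoHierarchicalSizing data (UndoHierarchicalSizing data)

-- ===== LEMMAS AND PROOFS =====

-- B's whole run from an arbitrary mid-pass state (stack, nodes): fold the rest, then drain
def bRun (rest : List (String × Int)) (S : List (String × Int × Int)) (O : List (String × Int)) :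
    List (String × Int) :=
  pvDrain (rest.foldl pvStep (S, O)).1 (rest.foldl pvStep (S, O)).2

lemma bRun_nil (S O) : bRun [] S O = pvDrain S O := rfl

lemma bRun_cons (x : String × Int) (r : List (String × Int)) (S O) :
    bRun (x :: r) S O = bRun r ((x.1, x.2, 0) :: (pvPopWhile x.1 S O).1) (pvPopWhile x.1 S O).2 := by
  simp [bRun, pvStep]

-- simp-style unfolding equations for A's loop
lemma pnALoop_nil (name : String) : (pnALoop name []).1 = ([], [], 0) := by
  rw [pnALoop]

lemma pnALoop_cons_true (name nn : String) (ns : Int) (r : List (String × Int))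
    (h : pvIsAnc name nn = true) :
    (pnALoop name ((nn, ns) :: r)).1 =
      ((pnALoop nn r).1.1 ++ [(nn, ns - (pnALoop nn r).1.2.2)]
          ++ (pnALoop name (pnALoop nn r).1.2.1).1.1,
        (pnALoop name (pnALoop nn r).1.2.1).1.2.1,
        ns + (pnALoop name (pnALoop nn r).1.2.1).1.2.2) := by
  conv_lhs => rw [pnALoop]
  simp [h]

lemma pnALoop_cons_false (name nn : String) (ns : Int) (r : List (String × Int))
    (h : pvIsAnc name nn = false) :
    (pnALoop name ((nn, ns) :: r)).1 = ([], (nn, ns) :: r, 0) := by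
  conv_lhs => rw [pnALoop]
  simp [h]

-- A's loop stops only at the end of data or at a node failing the child test
lemma pnALoop_stop (name : String) (rest : List (String × Int)) :
    (pnALoop name rest).1.2.1 = [] ∨
      ∃ h t, (pnALoop name rest).1.2.1 = h :: t ∧ pvIsAnc name h.1 = false := by
  induction name, rest using pnALoop.induct with
  | case1 name => simp [pnALoop_nil]
  | case2 name nn ns r hanc ih1 ih2 ih3 =>
    rw [pnALoop_cons_true name nn ns r hanc]
    exact ih3
  | case3 name nn ns r hanc =>
    rw [pnALoop_cons_false name nn ns r (by simpa using hanc)]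
    exact Or.inr ⟨(nn, ns), r, rfl, by simpa using hanc⟩

-- popping the top entry commutes with the rest of B's run when the next node (if any) rejects it
lemma bRun_pop (rest1 : List (String × Int)) (nn : String) (ns tc : Int)
    (T : List (String × Int × Int)) (O : List (String × Int))
    (h : rest1 = [] ∨ ∃ hd t, rest1 = hd :: t ∧ pvIsAnc nn hd.1 = false) :
    bRun rest1 ((nn, ns, tc) :: T) O = bRun rest1 (pvAddTop T ns) (O ++ [(nn, ns - tc)]) := by
  rcases h with h | ⟨hd, t, rfl, hrej⟩
  · subst h
    rw [bRun_nil, bRun_nil, pvDrain]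
  · rw [bRun_cons, bRun_cons]
    rw [pvPopWhile]
    simp [hrej]

-- main simulation lemma: B, with A's current frame (name, sz, ch) on top of the stack,
-- consumes exactly the segment A's loop consumes, emits the same nodes, and accumulates
-- the same child total onto the frame
lemma simul : ∀ (N : Nat) (rest : List (String × Int)), rest.length ≤ N →
    ∀ (name : String) (sz ch : Int) S O,
    bRun rest ((name, sz, ch) :: S) O =
      bRun (pnALoop name rest).1.2.1 ((name, sz, ch + (pnALoop name rest).1.2.2) :: S)
        (O ++ (pnALoop name rest).1.1) := by
  intro N
  induction N with
  | zero =>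
    intro rest hlen name sz ch S O
    have : rest = [] := List.length_eq_zero_iff.mp (Nat.le_zero.mp hlen)
    subst this
    simp [pnALoop]
  | succ N ih =>
    intro rest hlen name sz ch S O
    match rest with
    | [] => simp [pnALoop]
    | (nn, ns) :: r =>
      by_cases hanc : pvIsAnc name nn
      · -- child node
        have hstep : bRun ((nn, ns) :: r) ((name, sz, ch) :: S) O
            = bRun r ((nn, ns, 0) :: (name, sz, ch) :: S) O := by
          rw [bRun_cons]; rw [pvPopWhile]; simp [hanc]
        have hr : r.length ≤ N := by simp at hlen; omega
        have ih1 := ih r hr nn ns 0 ((name, sz, ch) :: S) O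
        have hrest1 : (pnALoop nn r).1.2.1.length ≤ N :=
          le_trans (pnALoop nn r).2 hr
        have hpop := bRun_pop (pnALoop nn r).1.2.1 nn ns
          (0 + (pnALoop nn r).1.2.2) ((name, sz, ch) :: S) (O ++ (pnALoop nn r).1.1)
          (pnALoop_stop nn r)
        have ih2 := ih (pnALoop nn r).1.2.1 hrest1 name sz (ch + ns)
          S ((O ++ (pnALoop nn r).1.1) ++ [(nn, ns - (0 + (pnALoop nn r).1.2.2))])
        rw [hstep, ih1, hpop]
        simp only [pvAddTop] at *
        rw [ih2]
        rw [pnALoop_cons_true name nn ns r hanc]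
        simp [add_assoc, List.append_assoc]
      · -- sibling or higher: the loop returns immediately
        rw [pnALoop_cons_false name nn ns r (by simpa using hanc)]
        simp

-- top level: B run from the empty stack produces A's output
lemma top : ∀ (N : Nat) (data : List (String × Int)), data.length ≤ N →
    ∀ O, bRun data [] O = O ++ pnAGo data := by
  intro N
  induction N with
  | zero =>
    intro data hlen O
    have : data = [] := List.length_eq_zero_iff.mp (Nat.le_zero.mp hlen)
    subst this
    simp [bRun_nil, pvDrain, pnAGo]
  | succ N ih =>
    intro data hlen O
    match data with
    | [] => simp [bRun_nil, pvDrain, pnAGo]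
    | (nm, szv) :: r =>
      have hr : r.length ≤ N := by simp at hlen; omega
      have h1 : bRun ((nm, szv) :: r) [] O = bRun r [(nm, szv, 0)] O := by
        rw [bRun_cons]; rw [pvPopWhile]
      have h2 := simul N r hr nm szv 0 [] O
      have hpop := bRun_pop (pnALoop nm r).1.2.1 nm szv (0 + (pnALoop nm r).1.2.2) []
        (O ++ (pnALoop nm r).1.1) (pnALoop_stop nm r)
      have hrest1 : (pnALoop nm r).1.2.1.length ≤ N := le_trans (pnALoop nm r).2 hr
      have ih1 := ih (pnALoop nm r).1.2.1 hrest1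
        ((O ++ (pnALoop nm r).1.1) ++ [(nm, szv - (0 + (pnALoop nm r).1.2.2))])
      rw [h1, h2, hpop]
      simp only [pvAddTop]
      rw [ih1]
      conv_rhs => rw [pnAGo]
      simp [List.append_assoc]

lemma total_eq (data : List (String × Int)) :
    UndoHierarchicalSizing data = UndoHierarchicalSizing_alt data := by
  have h := top data.length data le_rfl []
  simp only [List.nil_append] at h
  unfold UndoHierarchicalSizing UndoHierarchicalSizing_alt
  rw [← h]
  rfl

-- ===== VERDICT (by name: the statement is the Claim_ definition above) =====
theorem UndoHierarchicalSizing_spec : Claim_equal_UndoHierarchicalSizing := by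
  intro data _ _
  unfold Spec_UndoHierarchicalSizing
  exact total_eq data
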